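-- pv_equiv track=rewrite | github.com/kostoskistefan/lumina | lumina-font-converter.py | lfc_expand_ascii_range
-- ===== SOURCE A (Python) =====
-- def lfc_expand_ascii_range(input_ascii_range: str) -> list:
--     expanded_ranges = []
--
--     for ascii_range in input_ascii_range.split(','):
--         if '-' in ascii_range:
--             ascii_range_start, ascii_range_end = ascii_range.split('-')
--             expanded_ranges.extend(list(range(int(ascii_range_start), int(ascii_range_end) + 1)))
--         else:
--             expanded_ranges.append(int(ascii_range))
--
--     expanded_ranges = sorted(expanded_ranges)
--
--     # Remove characters that are not in the ASCII range and convert to character type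
--     expanded_ranges = list([chr(x) for x in expanded_ranges if x >= 0 and x <= 127])
--
--     return expanded_ranges
-- ===== SOURCE B (Python) =====
-- def lfc_expand_ascii_range(input_ascii_range: str) -> list:
--     # Counting sort over the 128 ASCII codes instead of collect-everything + sorted().
--     counts = [0] * 128
--
--     for ascii_range in input_ascii_range.split(','):
--         if '-' in ascii_range:
--             ascii_range_start, ascii_range_end = ascii_range.split('-')
--             for value in range(int(ascii_range_start), int(ascii_range_end) + 1):
--                 if 0 <= value <= 127:
--                     counts[value] += 1
--         else:
--             value = int(ascii_range)
--             if 0 <= value <= 127: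
--                 counts[value] += 1
--
--     result = []
--     for value in range(128):
--         result.extend([chr(value)] * counts[value])
--     return result
-- ===== Notes on version B (the rewrite author's own statement) =====
-- stated objective: alternative
-- what changed: B replaces A's collect-all-values + comparison sort + filter pipeline with a counting sort: it keeps a 128-slot count array, drops out-of-ASCII values inline while parsing, and emits chr(v)*counts[v] for v in 0..127.
import Mathlib
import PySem

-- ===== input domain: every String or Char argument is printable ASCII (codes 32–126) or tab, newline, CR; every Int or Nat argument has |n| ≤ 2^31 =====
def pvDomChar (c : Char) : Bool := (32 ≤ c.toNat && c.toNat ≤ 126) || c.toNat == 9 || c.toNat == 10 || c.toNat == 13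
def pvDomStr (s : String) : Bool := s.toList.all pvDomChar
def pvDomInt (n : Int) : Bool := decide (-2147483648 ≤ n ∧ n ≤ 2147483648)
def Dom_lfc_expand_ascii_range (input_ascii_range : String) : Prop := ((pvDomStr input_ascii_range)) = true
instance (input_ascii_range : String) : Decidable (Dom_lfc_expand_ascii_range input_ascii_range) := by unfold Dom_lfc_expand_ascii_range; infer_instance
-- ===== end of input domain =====

-- ===== PORT A =====
-- B reimplements A's collect + comparison-sort + filter as a counting sort over the 128 ASCII codes (objective: alternative).
-- chr(x); exact for 0 <= x <= 0x10FFFF (only used here with 0 <= x <= 127)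
def pvChr (x : Int) : String := String.ofList [Char.ofNat x.toNat]

-- one comma token of A's loop body: the Int values it contributes, none = ValueError
-- ("if '-' in t: a, b = t.split('-'); range(int(a), int(b)+1)  else: [int(t)]")
def pvTokVals? (t : List Char) : Option (List Int) :=
  if PySem.Chars.isIn "-".toList t then
    match PySem.Chars.splitOn t "-".toList with
    | [a, b] =>
      match PySem.Int.ofChars? a, PySem.Int.ofChars? b with
      | some s, some e => some (PySem.List.pyRange s (e + 1) 1)
      | _, _ => none
    | _ => none   -- unpacking t.split('-') into two names raises ValueError
  else
    (PySem.Int.ofChars? t).map (fun n => [n])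

def lfc_expand_ascii_range (input_ascii_range : String) : List String :=
  match (PySem.Chars.splitOn input_ascii_range.toList ",".toList).foldl
      (fun acc t =>
        match acc, pvTokVals? t with
        | some l, some v => some (l ++ v)
        | _, _ => none)
      (some ([] : List Int)) with
  | none => []   -- the Python raises ValueError here; excluded by Pre_
  | some vs =>
      ((PySem.List.sorted vs (fun x => x) false).filter
        (fun x => decide (0 ≤ x) && decide (x ≤ 127))).map pvChr

-- ===== PORT B =====
-- "if 0 <= value <= 127: counts[value] += 1" (counts has length 128, so the set is always in range)
def pvBump (c : List Nat) (v : Int) : List Nat :=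
  if 0 ≤ v ∧ v ≤ 127 then c.set v.toNat (c.getD v.toNat 0 + 1) else c

def lfc_expand_ascii_range_alt (input_ascii_range : String) : List String :=
  match (PySem.Chars.splitOn input_ascii_range.toList ",".toList).foldl
      (fun acc t =>
        match acc, pvTokVals? t with
        | some c, some v => some (v.foldl pvBump c)
        | _, _ => none)
      (some (List.replicate 128 (0 : Nat))) with
  | none => []   -- the Python raises ValueError here; excluded by Pre_
  | some counts =>
      (List.range 128).foldl
        (fun r v => r ++ List.replicate (counts.getD v 0) (pvChr (v : Int))) []

-- ===== PRECONDITION & SPEC =====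
-- Pre_: every comma token parses — either a plain int() literal without '-', or exactly one '-'
-- splitting it into two int() literals; elsewhere the Python (both A and B) raises ValueError.
def pvTokOk (t : List Char) : Bool :=
  if PySem.Chars.isIn "-".toList t then
    match PySem.Chars.splitOn t "-".toList with
    | [a, b] => (PySem.Int.ofChars? a).isSome && (PySem.Int.ofChars? b).isSome
    | _ => false
  else
    (PySem.Int.ofChars? t).isSome

def Pre_lfc_expand_ascii_range (input_ascii_range : String) : Prop :=
  (PySem.Chars.splitOn input_ascii_range.toList ",".toList).all pvTokOk = true
instance (input_ascii_range : String) : Decidable (Pre_lfc_expand_ascii_range input_ascii_range) := by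
  unfold Pre_lfc_expand_ascii_range; infer_instance

def pvWitness_lfc_expand_ascii_range : String := "65-70,32"

def Spec_lfc_expand_ascii_range (input_ascii_range : String) (out : List String) : Prop := out = lfc_expand_ascii_range_alt input_ascii_range
instance (input_ascii_range : String) (out : List String) : Decidable (Spec_lfc_expand_ascii_range input_ascii_range out) := by unfold Spec_lfc_expand_ascii_range; infer_instance

-- ===== CLAIM (what is proved, stated in full; the proofs are below) =====
def Claim_equal_lfc_expand_ascii_range : Prop := ∀ (input_ascii_range : String), Dom_lfc_expand_ascii_range input_ascii_range → Pre_lfc_expand_ascii_range input_ascii_range → Spec_lfc_expand_ascii_range input_ascii_range (lfc_expand_ascii_range input_ascii_range)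

-- ===== LEMMAS AND PROOFS =====

-- the concatenated values of a token list (proof-only canonical form of both folds)
def pvVals? : List (List Char) → Option (List Int)
  | [] => some []
  | t :: ts =>
    match pvTokVals? t, pvVals? ts with
    | some v, some r => some (v ++ r)
    | _, _ => none

theorem pvFoldA_none (ts : List (List Char)) :
    ts.foldl (fun acc t =>
        match acc, pvTokVals? t with
        | some l, some v => some (l ++ v)
        | _, _ => none) (none : Option (List Int)) = none := by
  induction ts with
  | nil => rfl
  | cons t ts ih => simpa using ih

theorem pvFoldB_none (ts : List (List Char)) :
    ts.foldl (fun acc t =>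
        match acc, pvTokVals? t with
        | some c, some v => some (v.foldl pvBump c)
        | _, _ => none) (none : Option (List Nat)) = none := by
  induction ts with
  | nil => rfl
  | cons t ts ih => simpa using ih

theorem pvFoldA_eq (ts : List (List Char)) : ∀ l0 : List Int,
    ts.foldl (fun acc t =>
        match acc, pvTokVals? t with
        | some l, some v => some (l ++ v)
        | _, _ => none) (some l0)
      = (pvVals? ts).map (fun l => l0 ++ l) := by
  induction ts with
  | nil => intro l0; simp [pvVals?]
  | cons t ts ih =>
    intro l0
    cases hv : pvTokVals? t with
    | none => simp [pvVals?, hv, pvFoldA_none]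
    | some v =>
      simp only [List.foldl_cons, hv]
      rw [ih (l0 ++ v)]
      cases hr : pvVals? ts <;> simp [pvVals?, hv, hr]

theorem pvFoldB_eq (ts : List (List Char)) : ∀ c0 : List Nat,
    ts.foldl (fun acc t =>
        match acc, pvTokVals? t with
        | some c, some v => some (v.foldl pvBump c)
        | _, _ => none) (some c0)
      = (pvVals? ts).map (fun l => l.foldl pvBump c0) := by
  induction ts with
  | nil => intro c0; simp [pvVals?]
  | cons t ts ih =>
    intro c0
    cases hv : pvTokVals? t with
    | none => simp [pvVals?, hv, pvFoldB_none]
    | some v =>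
      simp only [List.foldl_cons, hv]
      rw [ih (v.foldl pvBump c0)]
      cases hr : pvVals? ts <;> simp [pvVals?, hv, hr, List.foldl_append]

theorem pvVals?_isSome (ts : List (List Char)) (h : ts.all pvTokOk = true) :
    (pvVals? ts).isSome := by
  induction ts with
  | nil => simp [pvVals?]
  | cons t ts ih =>
    simp only [List.all_cons, Bool.and_eq_true] at h
    have ht : (pvTokVals? t).isSome := by
      have := h.1
      unfold pvTokOk at this
      unfold pvTokVals?
      split at this
      · split at this
        · rename_i a b _
          cases ha : PySem.Int.ofChars? a <;> cases hb : PySem.Int.ofChars? b <;>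
            simp_all
        · simp_all
      · cases hx : PySem.Int.ofChars? t <;> simp_all
    have hts := ih h.2
    unfold pvVals?
    cases hv : pvTokVals? t with
    | none => simp [hv] at ht
    | some v =>
      cases hr : pvVals? ts with
      | none => simp [hr] at hts
      | some r => simp

theorem pvBump_length (c : List Nat) (v : Int) : (pvBump c v).length = c.length := by
  unfold pvBump; split <;> simp

theorem pvCounts (xs : List Int) : ∀ (c : List Nat), c.length = 128 → ∀ v : Nat, v < 128 →
    (xs.foldl pvBump c).getD v 0 = c.getD v 0 + xs.count ((v : Nat) : Int) := by
  induction xs with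
  | nil => intro c _ v _; simp
  | cons x xs ih =>
    intro c hc v hv
    have hlen : (pvBump c x).length = 128 := by rw [pvBump_length, hc]
    rw [List.foldl_cons, ih (pvBump c x) hlen v hv, List.count_cons]
    have hstep : (pvBump c x).getD v 0 = c.getD v 0 + (if x = ((v : Nat) : Int) then 1 else 0) := by
      unfold pvBump
      split
      · rename_i hr
        by_cases hxv : x = ((v : Nat) : Int)
        · have : x.toNat = v := by omega
          simp [hxv, List.getD_eq_getElem?_getD, hc, hv]
        · have hne : x.toNat ≠ v := by omega
          simp [hxv, List.getD_eq_getElem?_getD, hne]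
      · rename_i hr
        have hxv : x ≠ ((v : Nat) : Int) := by omega
        simp [hxv]
    rw [hstep]
    by_cases hxv : x = ((v : Nat) : Int)
    · simp [hxv]
      omega
    · simp [hxv]

theorem pvReplicate128_getD (v : Nat) (hv : v < 128) :
    (List.replicate 128 (0 : Nat)).getD v 0 = 0 := by
  rw [List.getD_eq_getElem?_getD, List.getElem?_replicate, if_pos hv]
  rfl

-- membership in the counting-sort output
theorem pvFlat_mem (n : Nat) (c : Nat → Nat) (x : Int)
    (hx : x ∈ (List.range n).flatMap (fun v => List.replicate (c v) ((v : Nat) : Int))) :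
    ∃ v : Nat, v < n ∧ x = ((v : Nat) : Int) := by
  rcases List.mem_flatMap.mp hx with ⟨v, hv, hmem⟩
  exact ⟨v, List.mem_range.mp hv, List.eq_of_mem_replicate hmem⟩

theorem pvFlat_pairwise (n : Nat) (c : Nat → Nat) :
    ((List.range n).flatMap (fun v => List.replicate (c v) ((v : Nat) : Int))).Pairwise (· ≤ ·) := by
  induction n with
  | zero => simp
  | succ n ih =>
    rw [List.range_succ, List.flatMap_append]
    apply List.pairwise_append.mpr
    refine ⟨ih, ?_, ?_⟩
    · simp only [List.flatMap_cons, List.flatMap_nil, List.append_nil]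
      exact List.pairwise_replicate.mpr (Or.inr le_rfl)
    · intro a ha b hb
      rcases pvFlat_mem n c a ha with ⟨v, hv, rfl⟩
      simp only [List.flatMap_cons, List.flatMap_nil, List.append_nil] at hb
      have := List.eq_of_mem_replicate hb
      subst this
      exact_mod_cast Nat.le_of_lt hv

theorem pvFlat_count (n : Nat) (c : Nat → Nat) (x : Int) :
    ((List.range n).flatMap (fun v => List.replicate (c v) ((v : Nat) : Int))).count x
      = if 0 ≤ x ∧ x < (n : Int) then c x.toNat else 0 := by
  induction n with
  | zero =>
    simp only [List.range_zero, List.flatMap_nil, List.count_nil]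
    rw [if_neg (by omega)]
  | succ n ih =>
    rw [List.range_succ, List.flatMap_append, List.count_append, ih]
    simp only [List.flatMap_cons, List.flatMap_nil, List.append_nil, List.count_replicate]
    by_cases hx : x = ((n : Nat) : Int)
    · subst hx
      rw [if_neg (by omega : ¬ (0 ≤ ((n:Nat):Int) ∧ ((n:Nat):Int) < (n : Int))),
          if_pos (by omega : 0 ≤ ((n:Nat):Int) ∧ ((n:Nat):Int) < ((n+1 : Nat) : Int))]
      simp
    · have hb : (((n:Nat):Int) == x) = false := beq_eq_false_iff_ne.mpr (fun he => hx he.symm)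
      rw [hb]
      simp only [Bool.false_eq_true, if_false, add_zero]
      by_cases h : 0 ≤ x ∧ x < (n : Int)
      · rw [if_pos h, if_pos (by omega : 0 ≤ x ∧ x < ((n+1 : Nat) : Int))]
      · rw [if_neg h, if_neg (by push_cast at *; omega : ¬ (0 ≤ x ∧ x < ((n+1 : Nat) : Int)))]

-- sorted + filter to 0..127  =  counting-sort output
theorem pvSortFilter (vs : List Int) :
    (PySem.List.sorted vs (fun x => x) false).filter (fun x => decide (0 ≤ x) && decide (x ≤ 127))
      = (List.range 128).flatMap (fun v => List.replicate (vs.count ((v : Nat) : Int)) ((v : Nat) : Int)) := by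
  apply PySem.List.eq_of_perm_of_pairwise_le
  · apply List.perm_iff_count.mpr
    intro x
    rw [pvFlat_count 128 (fun v => vs.count ((v:Nat):Int)) x]
    by_cases h : 0 ≤ x ∧ x < ((128 : Nat) : Int)
    · have hp : (decide (0 ≤ x) && decide (x ≤ 127)) = true := by
        simp only [Bool.and_eq_true, decide_eq_true_eq]
        push_cast at h
        omega
      have hx : ((x.toNat : Nat) : Int) = x := by omega
      rw [@List.count_filter Int _ _ (fun y => decide (0 ≤ y) && decide (y ≤ 127)) x _ hp, if_pos h, hx]
      exact (PySem.List.sorted_perm vs (fun x => x) false).count_eq x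
    · rw [if_neg h, List.count_eq_zero]
      intro hmem
      have hpx := (List.mem_filter.mp hmem).2
      simp only [Bool.and_eq_true, decide_eq_true_eq] at hpx
      push_cast at h
      omega
  · exact List.Pairwise.filter _ (PySem.List.sorted_pairwise vs (fun x => x))
  · exact pvFlat_pairwise 128 _

-- ===== VERDICT (by name: the statement is the Claim_ definition above) =====
theorem lfc_expand_ascii_range_spec : Claim_equal_lfc_expand_ascii_range := by
  intro s _ hpre
  unfold Spec_lfc_expand_ascii_range lfc_expand_ascii_range lfc_expand_ascii_range_alt
  rw [pvFoldA_eq _ [], pvFoldB_eq _ (List.replicate 128 0)]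
  have hsome := pvVals?_isSome _ hpre
  cases hvs : pvVals? (PySem.Chars.splitOn s.toList ",".toList) with
  | none => rw [hvs] at hsome; simp at hsome
  | some vs =>
    simp only [Option.map_some, List.nil_append]
    rw [PySem.List.foldl_append_eq_flatMap]
    have hc : ∀ v : Nat, v < 128 →
        ((vs.foldl pvBump (List.replicate 128 0)).getD v 0) = vs.count ((v : Nat) : Int) := by
      intro v hv
      rw [pvCounts vs _ (by simp) v hv, pvReplicate128_getD v hv]
      omega
    rw [pvSortFilter vs]
    simp only [List.nil_append, List.map_flatMap, List.map_replicate]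
    apply List.flatMap_congr
    intro v hvm
    rw [hc v (List.mem_range.mp hvm)]
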